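-- pv_equiv track=rewrite | github.com/zadacka/advent_of_code_2022 | day08/day08.py | visible_trees_in_list
-- ===== SOURCE A (Python) =====
-- def visible_trees_in_list(input_list):
--     visible_trees = [
--         index for index, tree_height in enumerate(input_list)
--         if (
--                 index == 0 or  # first tree always visible
--                 index == len(input_list) - 1 or  # last tree always visible
--                 max(input_list[:index]) < tree_height or  # visible from the left
--                 max(input_list[index + 1:]) < tree_height)  # visible from the right
--     ]
--     return visible_trees
-- ===== SOURCE B (Python) =====
-- def visible_trees_in_list(input_list):
--     # O(n): running-max sweep from each end instead of max() over a slice per index.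
--     def sweep(xs):
--         out = []
--         run = None
--         for h in xs:
--             out.append(run is None or run < h)
--             run = h if run is None else max(run, h)
--         return out
--
--     left = sweep(input_list)
--     right = sweep(input_list[::-1])[::-1]
--     return [i for i, (l, r) in enumerate(zip(left, right)) if l or r]
-- ===== Notes on version B (the rewrite author's own statement) =====
-- stated objective: faster
-- what changed: Replaced the per-index max() over both slices with two linear running-max sweeps (prefix and suffix), so each element is inspected O(1) times.
import Mathlib
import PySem

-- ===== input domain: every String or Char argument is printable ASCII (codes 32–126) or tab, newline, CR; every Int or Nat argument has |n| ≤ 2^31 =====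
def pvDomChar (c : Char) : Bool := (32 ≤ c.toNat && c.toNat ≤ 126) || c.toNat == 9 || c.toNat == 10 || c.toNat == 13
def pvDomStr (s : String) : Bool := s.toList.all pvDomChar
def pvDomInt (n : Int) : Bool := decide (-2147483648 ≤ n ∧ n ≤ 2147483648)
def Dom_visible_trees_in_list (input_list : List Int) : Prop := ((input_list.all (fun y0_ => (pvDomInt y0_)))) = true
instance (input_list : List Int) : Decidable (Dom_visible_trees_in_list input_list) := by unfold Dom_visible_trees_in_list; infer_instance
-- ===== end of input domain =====

-- B replaces A's per-index max() over both slices with two linear running-max sweeps.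

-- ===== PORT A =====
-- literal port of the comprehension: filter enumerate by the four-way disjunction, keep the indices.
-- max() of an empty slice would raise in Python but is short-circuited away (index 0 / last index);
-- the port's `none => false` in those matches is unreachable for the same reason.
def visible_trees_in_list (input_list : List Int) : List Int :=
  ((PySem.List.enumerate input_list 0).filter (fun (p : Int × Int) =>
      (p.1 == 0) ||
      (p.1 == PySem.List.len input_list - 1) ||
      (match PySem.List.max? (PySem.List.slice input_list none (some p.1)) (fun y => y) with
       | some m => decide (m < p.2)
       | none => false) ||
      (match PySem.List.max? (PySem.List.slice input_list (some (p.1 + 1)) none) (fun y => y) with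
       | some m => decide (m < p.2)
       | none => false))).map (fun p => p.1)

-- ===== PORT B =====
-- sweep(xs): one pass with a running maximum `run : Option Int`; emits whether each tree beats everything before it.
def pvSweep (run : Option Int) : List Int → List Bool
  | [] => []
  | h :: t =>
      (match run with | none => true | some m => decide (m < h)) ::
        pvSweep (some (match run with | none => h | some m => max m h)) t

def visible_trees_in_list_alt (input_list : List Int) : List Int :=
  let left := pvSweep none input_list
  let right := (pvSweep none input_list.reverse).reverse
  ((PySem.List.enumerate (List.zipWith (fun l r => l || r) left right) 0).filter
      (fun p => p.2)).map (fun p => p.1)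

-- ===== PRECONDITION & SPEC =====
def Spec_visible_trees_in_list (input_list : List Int) (out : List Int) : Prop := out = visible_trees_in_list_alt input_list
instance (input_list : List Int) (out : List Int) : Decidable (Spec_visible_trees_in_list input_list out) := by unfold Spec_visible_trees_in_list; infer_instance

-- ===== CLAIM (what is proved, stated in full; the proofs are below) =====
def Claim_equal_visible_trees_in_list : Prop := ∀ (input_list : List Int), Dom_visible_trees_in_list input_list → Spec_visible_trees_in_list input_list (visible_trees_in_list input_list)

-- ===== LEMMAS AND PROOFS =====

-- A's filter predicate, named for the proofs
def pvP (xs : List Int) (i h : Int) : Bool :=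
  (i == 0) ||
  (i == PySem.List.len xs - 1) ||
  (match PySem.List.max? (PySem.List.slice xs none (some i)) (fun y => y) with
   | some m => decide (m < h)
   | none => false) ||
  (match PySem.List.max? (PySem.List.slice xs (some (i + 1)) none) (fun y => y) with
   | some m => decide (m < h)
   | none => false)

-- the running-max step and head test of pvSweep, named for the proofs
def pvStep (r : Option Int) (h : Int) : Option Int :=
  some (match r with | none => h | some m => max m h)

def pvOptLt (r : Option Int) (h : Int) : Bool :=
  match r with | none => true | some m => decide (m < h)

@[simp] lemma length_pvSweep (run : Option Int) (t : List Int) :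
    (pvSweep run t).length = t.length := by
  induction t generalizing run with
  | nil => rfl
  | cons h t ih => simp [pvSweep, ih]

lemma pvSweep_getElem : ∀ (t : List Int) (run : Option Int) (k : Nat) (hk : k < t.length),
    (pvSweep run t)[k]'(by simpa using hk) =
      pvOptLt (List.foldl pvStep run (t.take k)) (t[k]'hk) := by
  intro t
  induction t with
  | nil => intro _ k hk; simp at hk
  | cons h t ih =>
      intro run k hk
      cases k with
      | zero => cases run <;> simp [pvSweep, pvOptLt]
      | succ k =>
          simp only [pvSweep, List.getElem_cons_succ, List.take_succ_cons, List.foldl_cons]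
          exact ih (pvStep run h) k (by simpa using hk)

lemma foldl_max_swap : ∀ (t : List Int) (a b : Int),
    List.foldl max (max a b) t = max (List.foldl max a t) b := by
  intro t
  induction t with
  | nil => intro a b; rfl
  | cons c t ih =>
      intro a b
      simp only [List.foldl_cons]
      rw [show max (max a b) c = max (max a c) b by
        simp [max_assoc, max_comm b c], ih]

lemma pvFold_some : ∀ (t : List Int) (m : Int),
    List.foldl pvStep (some m) t = some (List.foldl max m t) := by
  intro t
  induction t with
  | nil => intro m; rfl
  | cons h t ih => intro m; simp [pvStep, ih]

lemma pvFold_none_eq_max? (l : List Int) :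
    List.foldl pvStep none l = PySem.List.max? l (fun y => y) := by
  cases l with
  | nil => rfl
  | cons x t =>
      rw [PySem.List.max?_id_cons]
      simpa [pvStep] using pvFold_some t x

lemma pvFold_none_reverse : ∀ (l : List Int),
    List.foldl pvStep none l.reverse = List.foldl pvStep none l := by
  intro l
  induction l with
  | nil => rfl
  | cons x t ih =>
      rw [List.reverse_cons, List.foldl_append, ih]
      cases t with
      | nil => rfl
      | cons y u =>
          simp only [List.foldl_cons, pvFold_some, pvStep, List.foldl_nil]
          rw [max_comm x y, foldl_max_swap u y x]

-- filtering enumerate by a predicate on (index, value) equals filtering an enumerate of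
-- booleans that agree pointwise with that predicate.
lemma pvFiltEq (p : Int → Int → Bool) :
    ∀ (ys : List Int) (bs : List Bool) (s : Int),
      bs.length = ys.length →
      (∀ (k : Nat) (hy : k < ys.length) (hb : k < bs.length),
          bs[k]'hb = p (s + (k : Int)) (ys[k]'hy)) →
      ((PySem.List.enumerate ys s).filter (fun q => p q.1 q.2)).map (fun q => q.1) =
        ((PySem.List.enumerate bs s).filter (fun q => q.2)).map (fun q => q.1) := by
  intro ys
  induction ys with
  | nil =>
      intro bs s hlen _
      have : bs = [] := List.length_eq_zero_iff.mp (by simpa using hlen)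
      subst this; rfl
  | cons y yt ih =>
      intro bs s hlen H
      cases bs with
      | nil => simp at hlen
      | cons b bt =>
          have hb : b = p s y := by simpa using H 0 (by simp) (by simp)
          have hrest := ih bt (s + 1) (by simpa using hlen)
            (fun k hy hb' => by
              have := H (k + 1) (by simpa using Nat.succ_lt_succ hy)
                (by simpa using Nat.succ_lt_succ hb')
              simpa [add_assoc, add_comm, add_left_comm, Nat.cast_add] using this)
          simp only [PySem.List.enumerate_cons, List.filter_cons]
          subst hb
          cases hpb : p s y <;> simp [hrest]

-- pointwise agreement of B's visibility bits with A's predicate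
lemma pv_point (xs : List Int) (k : Nat) (hy : k < xs.length)
    (hb : k < (List.zipWith (fun l r => l || r) (pvSweep none xs)
        ((pvSweep none xs.reverse).reverse)).length) :
    (List.zipWith (fun l r => l || r) (pvSweep none xs)
        ((pvSweep none xs.reverse).reverse))[k]'hb
      = pvP xs (0 + (k : Int)) (xs[k]'hy) := by
  have hrl : ((pvSweep none xs.reverse).reverse).length = xs.length := by simp
  have hj : xs.length - 1 - k < xs.reverse.length := by simp; omega
  rw [List.getElem_zipWith, pvSweep_getElem xs none k hy, List.getElem_reverse]
  have hidx : (pvSweep none xs.reverse).length - 1 - k = xs.length - 1 - k := by simp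
  simp only [hidx]
  rw [pvSweep_getElem xs.reverse none (xs.length - 1 - k) hj]
  have htk : xs.reverse.take (xs.length - 1 - k) = (xs.drop (k + 1)).reverse := by
    rw [List.take_reverse, show xs.length - (xs.length - 1 - k) = k + 1 from by omega]
  have hgr : xs.reverse[xs.length - 1 - k]'hj = xs[k]'hy := by
    rw [List.getElem_reverse]
    simp only [show xs.length - 1 - (xs.length - 1 - k) = k from by omega]
  rw [htk, pvFold_none_reverse, hgr]
  simp only [pvP, zero_add, PySem.List.len_eq]
  rw [PySem.List.slice_to_natCast,
      show ((k : Int) + 1) = (((k + 1 : Nat)) : Int) by push_cast; ring,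
      PySem.List.slice_from_natCast, ← pvFold_none_eq_max?, ← pvFold_none_eq_max?]
  rcases h1 : List.foldl pvStep none (xs.take k) with _ | m1
  · -- prefix fold is none ⇒ k = 0, first disjunct of A's test fires
    rw [pvFold_none_eq_max?, PySem.List.max?_eq_none_iff] at h1
    have hk0 : k = 0 := by
      rcases List.take_eq_nil_iff.mp h1 with h | h
      · exact h
      · exact absurd h (by intro h'; rw [h'] at hy; simp at hy)
    subst hk0
    simp [pvOptLt]
  · have hk0 : k ≠ 0 := by
      intro h'
      subst h'
      rw [List.take_zero] at h1
      exact Option.some_ne_none m1 (by rw [← h1]; rfl)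
    have e0 : (((k : Nat) : Int) == 0) = false := beq_eq_false_iff_ne.mpr (by omega)
    rcases h2 : List.foldl pvStep none (xs.drop (k + 1)) with _ | m2
    · -- suffix fold is none ⇒ k = length - 1, second disjunct of A's test fires
      rw [pvFold_none_eq_max?, PySem.List.max?_eq_none_iff, List.drop_eq_nil_iff] at h2
      have e1 : (((k : Nat) : Int) == (xs.length : Int) - 1) = true :=
        beq_iff_eq.mpr (by omega)
      simp [pvOptLt, e0, e1]
    · -- both folds are some ⇒ interior index, both index tests are false
      have hk1 : k + 1 < xs.length := by
        by_contra h'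
        rw [List.drop_eq_nil_iff.mpr (by omega)] at h2
        exact Option.some_ne_none m2 (by rw [← h2]; rfl)
      have e1 : (((k : Nat) : Int) == (xs.length : Int) - 1) = false :=
        beq_eq_false_iff_ne.mpr (by omega)
      simp [pvOptLt, e0, e1]

theorem pv_main (xs : List Int) :
    visible_trees_in_list xs = visible_trees_in_list_alt xs := by
  have hlen : (List.zipWith (fun l r => l || r) (pvSweep none xs)
      ((pvSweep none xs.reverse).reverse)).length = xs.length := by simp
  exact pvFiltEq (pvP xs) xs _ 0 hlen (pv_point xs)

-- ===== VERDICT (by name: the statement is the Claim_ definition above) =====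
theorem visible_trees_in_list_spec : Claim_equal_visible_trees_in_list := by
  intro xs _
  unfold Spec_visible_trees_in_list
  exact pv_main xs
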